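-- pv_equiv track=rewrite | github.com/jwcherney/2022AdventOfCode | day18/day18.py | get_vertices_and_faces
-- ===== SOURCE A (Python) =====
-- def get_vertices_and_faces(cube_dot):
--     x, y, z = cube_dot
--     vertices = {(x, y, z), (x - 1, y, z), (x - 1, y - 1, z), (x - 1, y - 1, z - 1),
--                 (x - 1, y, z - 1), (x, y - 1, z), (x, y - 1, z - 1), (x, y, z - 1)}
--     faces = list()
--     faces.append({(xx, yy, zz) for xx, yy, zz in vertices if xx == x})
--     faces.append({(xx, yy, zz) for xx, yy, zz in vertices if xx == x - 1})
--     faces.append({(xx, yy, zz) for xx, yy, zz in vertices if yy == y})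
--     faces.append({(xx, yy, zz) for xx, yy, zz in vertices if yy == y - 1})
--     faces.append({(xx, yy, zz) for xx, yy, zz in vertices if zz == z})
--     faces.append({(xx, yy, zz) for xx, yy, zz in vertices if zz == z - 1})
--     return vertices, faces
-- ===== SOURCE B (Python) =====
-- # Table-driven reimplementation: one corner-offset table and one face-index table
-- # replace A's set comprehensions that filter the vertex set per coordinate.
-- _CORNER_OFFSETS = [(0, 0, 0), (1, 0, 0), (1, 1, 0), (1, 1, 1),
--                    (1, 0, 1), (0, 1, 0), (0, 1, 1), (0, 0, 1)]
-- _FACE_CORNERS = [(0, 5, 6, 7), (1, 2, 3, 4), (0, 1, 4, 7),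
--                  (2, 3, 5, 6), (0, 1, 2, 5), (3, 4, 6, 7)]
--
--
-- def get_vertices_and_faces(cube_dot):
--     x, y, z = cube_dot
--     corners = [(x - dx, y - dy, z - dz) for dx, dy, dz in _CORNER_OFFSETS]
--     vertices = set(corners)
--     faces = [{corners[i], corners[j], corners[k], corners[l]}
--              for i, j, k, l in _FACE_CORNERS]
--     return vertices, faces
-- ===== Notes on version B (the rewrite author's own statement) =====
-- stated objective: alternative
-- what changed: Replaces A's per-coordinate set-comprehension filters over the vertex set with a table-driven mesh representation: a corner-offset table builds the 8 vertices and a face-index table picks each face's 4 corners directly, with no filtering.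
import Mathlib
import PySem

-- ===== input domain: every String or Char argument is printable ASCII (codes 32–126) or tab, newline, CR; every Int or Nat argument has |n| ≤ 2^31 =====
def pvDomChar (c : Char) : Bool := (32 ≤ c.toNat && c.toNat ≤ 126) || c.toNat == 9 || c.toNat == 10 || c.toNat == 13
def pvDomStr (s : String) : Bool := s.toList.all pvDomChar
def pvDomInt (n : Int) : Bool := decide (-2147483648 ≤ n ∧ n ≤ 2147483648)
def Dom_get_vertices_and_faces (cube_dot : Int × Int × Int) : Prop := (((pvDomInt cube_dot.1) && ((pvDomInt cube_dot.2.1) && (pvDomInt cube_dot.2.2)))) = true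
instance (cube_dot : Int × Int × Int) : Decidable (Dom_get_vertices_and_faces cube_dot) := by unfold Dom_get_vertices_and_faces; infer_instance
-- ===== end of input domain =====

-- B replaces A's six per-coordinate set-comprehension filters of the vertex set by a
-- corner-offset table and a face-index table (standard mesh representation); same values.

-- ===== PORT A =====
def get_vertices_and_faces (cube_dot : Int × Int × Int) : (List (Int × Int × Int)) × (List (List (Int × Int × Int))) :=
  match cube_dot with
  | (x, y, z) =>
    let vertices : PySem.Set (Int × Int × Int) :=
      PySem.Set.ofList [(x, y, z), (x - 1, y, z), (x - 1, y - 1, z), (x - 1, y - 1, z - 1),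
                        (x - 1, y, z - 1), (x, y - 1, z), (x, y - 1, z - 1), (x, y, z - 1)]
    let faces : List (List (Int × Int × Int)) := []
    let faces := faces ++ [PySem.Set.ofList (vertices.filter (fun v => v.1 == x))]
    let faces := faces ++ [PySem.Set.ofList (vertices.filter (fun v => v.1 == x - 1))]
    let faces := faces ++ [PySem.Set.ofList (vertices.filter (fun v => v.2.1 == y))]
    let faces := faces ++ [PySem.Set.ofList (vertices.filter (fun v => v.2.1 == y - 1))]
    let faces := faces ++ [PySem.Set.ofList (vertices.filter (fun v => v.2.2 == z))]
    let faces := faces ++ [PySem.Set.ofList (vertices.filter (fun v => v.2.2 == z - 1))]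
    (vertices, faces)

-- ===== PORT B =====
def pvCornerOffsets : List (Int × Int × Int) :=
  [(0, 0, 0), (1, 0, 0), (1, 1, 0), (1, 1, 1), (1, 0, 1), (0, 1, 0), (0, 1, 1), (0, 0, 1)]
def pvFaceCorners : List (Int × Int × Int × Int) :=
  [(0, 5, 6, 7), (1, 2, 3, 4), (0, 1, 4, 7), (2, 3, 5, 6), (0, 1, 2, 5), (3, 4, 6, 7)]

def get_vertices_and_faces_alt (cube_dot : Int × Int × Int) : (List (Int × Int × Int)) × (List (List (Int × Int × Int))) :=
  match cube_dot with
  | (x, y, z) =>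
    let corners : List (Int × Int × Int) :=
      pvCornerOffsets.map (fun o => (x - o.1, y - o.2.1, z - o.2.2))
    let vertices : PySem.Set (Int × Int × Int) := PySem.Set.ofList corners
    -- corners[i]: the table indices are literals 0..7, always in range for the
    -- 8-element corners list, so pyGetD is exact here (Python never raises).
    let faces : List (List (Int × Int × Int)) :=
      pvFaceCorners.map (fun f =>
        PySem.Set.ofList [PySem.List.pyGetD corners f.1 (0, 0, 0),
                          PySem.List.pyGetD corners f.2.1 (0, 0, 0),
                          PySem.List.pyGetD corners f.2.2.1 (0, 0, 0),
                          PySem.List.pyGetD corners f.2.2.2 (0, 0, 0)])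
    (vertices, faces)

-- ===== PRECONDITION & SPEC =====
def Spec_get_vertices_and_faces (cube_dot : Int × Int × Int) (out : (List (Int × Int × Int)) × (List (List (Int × Int × Int)))) : Prop := out = get_vertices_and_faces_alt cube_dot
instance (cube_dot : Int × Int × Int) (out : (List (Int × Int × Int)) × (List (List (Int × Int × Int)))) : Decidable (Spec_get_vertices_and_faces cube_dot out) := by unfold Spec_get_vertices_and_faces; infer_instance

-- ===== CLAIM (what is proved, stated in full; the proofs are below) =====
def Claim_equal_get_vertices_and_faces : Prop := ∀ (cube_dot : Int × Int × Int), Dom_get_vertices_and_faces cube_dot → Spec_get_vertices_and_faces cube_dot (get_vertices_and_faces cube_dot)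

-- ===== LEMMAS AND PROOFS =====

-- ===== VERDICT (by name: the statement is the Claim_ definition above) =====
theorem get_vertices_and_faces_spec : Claim_equal_get_vertices_and_faces := by
  intro ⟨x, y, z⟩ _
  unfold Spec_get_vertices_and_faces get_vertices_and_faces get_vertices_and_faces_alt
  have h1 : ¬ (x - 1 = x) := by omega
  have h2 : ¬ (y - 1 = y) := by omega
  have h3 : ¬ (z - 1 = z) := by omega
  have h4 : ¬ (x = x - 1) := by omega
  have h5 : ¬ (y = y - 1) := by omega
  have h6 : ¬ (z = z - 1) := by omega
  have b1 : (x - 1 == x) = false := beq_eq_false_iff_ne.mpr h1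
  have b2 : (y - 1 == y) = false := beq_eq_false_iff_ne.mpr h2
  have b3 : (z - 1 == z) = false := beq_eq_false_iff_ne.mpr h3
  have b4 : (x == x - 1) = false := beq_eq_false_iff_ne.mpr h4
  have b5 : (y == y - 1) = false := beq_eq_false_iff_ne.mpr h5
  have b6 : (z == z - 1) = false := beq_eq_false_iff_ne.mpr h6
  simp [pvCornerOffsets, pvFaceCorners, PySem.Set.ofList, PySem.Set.add,
        PySem.Set.contains, PySem.List.pyGetD, PySem.List.pyGet?, PySem.List.pyIdx?,
        List.filter, h1, h2, h3, h4, h5, h6, b1, b2, b3, b4, b5, b6]
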